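-- pv_equiv track=rewrite | github.com/eotter-beep/zweb | dns.py | _sanitise_label
-- ===== SOURCE A (Python) =====
-- from typing import List, Tuple
--
-- def _sanitise_label(label: str) -> str:
--     """Convert ``label`` into a DNS-friendly token."""
--
--     cleaned: List[str] = []
--     previous_dash = False
--     for character in label.lower():
--         if character.isalnum():
--             cleaned.append(character)
--             previous_dash = False
--         else:
--             if not previous_dash:
--                 cleaned.append("-")
--             previous_dash = True
--     result = "".join(cleaned).strip("-")
--     return result
-- ===== SOURCE B (Python) =====
-- def _sanitise_label(label: str) -> str:
--     """Convert ``label`` into a DNS-friendly token (run-based rewrite)."""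
--     s = label.lower()
--     tokens = []
--     i = 0
--     n = len(s)
--     while i < n:
--         if s[i].isalnum():
--             j = i
--             while j < n and s[j].isalnum():
--                 j += 1
--             tokens.append(s[i:j])
--             i = j
--         else:
--             i += 1
--     return "-".join(tokens)
-- ===== Notes on version B (the rewrite author's own statement) =====
-- stated objective: alternative
-- what changed: Replaces A's char-by-char scan with a previous_dash sentinel plus a final strip('-') by a run-based scan that collects the maximal alphanumeric runs as tokens and returns '-'.join(tokens), which collapses and trims separators by construction.
import Mathlib
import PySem

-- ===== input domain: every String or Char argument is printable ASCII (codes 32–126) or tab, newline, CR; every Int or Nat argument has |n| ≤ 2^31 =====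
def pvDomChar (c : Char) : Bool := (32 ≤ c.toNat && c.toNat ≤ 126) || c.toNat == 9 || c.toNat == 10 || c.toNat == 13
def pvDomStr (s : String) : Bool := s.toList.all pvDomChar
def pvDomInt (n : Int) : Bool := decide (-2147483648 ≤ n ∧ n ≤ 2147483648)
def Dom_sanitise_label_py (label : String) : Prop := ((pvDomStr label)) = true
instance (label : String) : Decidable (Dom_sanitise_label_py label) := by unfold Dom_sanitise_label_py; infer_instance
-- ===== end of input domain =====

-- B replaces A's char-by-char previous_dash sentinel plus final strip('-') by collecting the
-- maximal alphanumeric runs and joining them with '-' (objective: simpler decomposition).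

-- ===== PORT A =====
-- the for-loop of A: state = (cleaned, previous_dash)
def loopA : List Char → List Char → Bool → List Char
  | [], cleaned, _ => cleaned
  | c :: rest, cleaned, prev =>
    if PySem.Chars.isalnum c then loopA rest (cleaned ++ [c]) false
    else if prev then loopA rest cleaned true
    else loopA rest (cleaned ++ ['-']) true

def sanitise_label_py (label : String) : String :=
  String.ofList (PySem.Chars.stripChars (loopA (PySem.Chars.lower label.toList) [] false) ['-'])

-- ===== PORT B =====
-- B's outer while loop: at an alnum char take the whole run (inner while = takeWhile) as a token,
-- else advance one char; finally '-'.join(tokens)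
def tokensB : List Char → List (List Char)
  | [] => []
  | c :: cs =>
    if PySem.Chars.isalnum c then
      (c :: cs.takeWhile PySem.Chars.isalnum) :: tokensB (cs.dropWhile PySem.Chars.isalnum)
    else tokensB cs
termination_by l => l.length
decreasing_by
  · have := List.length_dropWhile_le PySem.Chars.isalnum cs; simp; omega
  · simp

def sanitise_label_py_alt (label : String) : String :=
  String.ofList (PySem.Chars.join ['-'] (tokensB (PySem.Chars.lower label.toList)))

-- ===== PRECONDITION & SPEC =====
def Spec_sanitise_label_py (label : String) (out : String) : Prop := out = sanitise_label_py_alt label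
instance (label : String) (out : String) : Decidable (Spec_sanitise_label_py label out) := by unfold Spec_sanitise_label_py; infer_instance

-- ===== CLAIM (what is proved, stated in full; the proofs are below) =====
def Claim_equal_sanitise_label_py : Prop := ∀ (label : String), Dom_sanitise_label_py label → Spec_sanitise_label_py label (sanitise_label_py label)

-- ===== LEMMAS AND PROOFS =====

-- abbreviations used only by the proofs
def alC : Char → Bool := PySem.Chars.isalnum
def nalC : Char → Bool := fun c => !PySem.Chars.isalnum c
def dashP : Char → Bool := fun c => [('-' : Char)].contains c
def gA (M : List Char) : List Char := loopA M [] false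
def rstripD (xs : List Char) : List Char := (xs.reverse.dropWhile dashP).reverse

lemma dashP_dash : dashP '-' = true := by decide

lemma dashP_of_al {c : Char} (h : alC c = true) : dashP c = false := by
  by_cases hc : c = '-'
  · subst hc; exact absurd h (by decide)
  · simp [dashP, hc]

lemma loopA_acc (L : List Char) : ∀ acc p, loopA L acc p = acc ++ loopA L [] p := by
  induction L with
  | nil => intro acc p; simp [loopA]
  | cons c cs ih =>
    intro acc p
    by_cases h : PySem.Chars.isalnum c = true
    · simp only [loopA, h, if_pos]
      rw [ih (acc ++ [c]) false, ih ([] ++ [c]) false]; simp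
    · simp only [Bool.not_eq_true] at h
      cases p with
      | true =>
        simp only [loopA, h, Bool.false_eq_true, if_false, if_true]
        exact ih acc true
      | false =>
        simp only [loopA, h, Bool.false_eq_true, if_false]
        rw [ih (acc ++ ['-']) true, ih ([] ++ ['-']) true]; simp

lemma gA_cons_al {c : Char} (cs : List Char) (h : alC c = true) :
    gA (c :: cs) = c :: gA cs := by
  have h' : PySem.Chars.isalnum c = true := h
  simp only [gA, loopA, h', if_pos]
  rw [loopA_acc cs ([] ++ [c]) false]; simp

lemma loopT_eq (cs : List Char) : loopA cs [] true = gA (cs.dropWhile nalC) := by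
  induction cs with
  | nil => simp [loopA, gA]
  | cons c cs ih =>
    by_cases h : alC c = true
    · have h' : PySem.Chars.isalnum c = true := h
      have hd : List.dropWhile nalC (c :: cs) = c :: cs := by
        simp [nalC, h']
      rw [hd, gA_cons_al cs h]
      simp only [loopA, h', if_pos]
      rw [loopA_acc cs ([] ++ [c]) false]; simp [gA]
    · simp only [alC, Bool.not_eq_true] at h
      have hd : List.dropWhile nalC (c :: cs) = List.dropWhile nalC cs := by
        simp [nalC, h]
      rw [hd, ← ih]
      simp [loopA, h]

lemma gA_cons_nal {c : Char} (cs : List Char) (h : alC c = false) :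
    gA (c :: cs) = '-' :: gA (cs.dropWhile nalC) := by
  have h' : PySem.Chars.isalnum c = false := h
  simp only [gA, loopA, h', Bool.false_eq_true, if_false]
  rw [loopA_acc cs ([] ++ ['-']) true, loopT_eq]
  simp only [List.nil_append, List.singleton_append]
  rfl

lemma gA_run : ∀ (t r : List Char), (∀ x ∈ t, alC x = true) → gA (t ++ r) = t ++ gA r := by
  intro t
  induction t with
  | nil => intro r _; simp
  | cons c cs ih =>
    intro r h
    have hc : alC c = true := h c (by simp)
    rw [List.cons_append, gA_cons_al _ hc, ih r (fun x hx => h x (by simp [hx]))]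
    simp

-- shape of dropWhile nalC: empty or starts with an alnum char; in particular idempotent
lemma dropWhile_nal_shape (L : List Char) :
    L.dropWhile nalC = [] ∨ ∃ e es, L.dropWhile nalC = e :: es ∧ alC e = true := by
  induction L with
  | nil => left; rfl
  | cons c cs ih =>
    by_cases h : alC c = true
    · right
      refine ⟨c, cs, ?_, h⟩
      have h' : PySem.Chars.isalnum c = true := h
      simp [nalC, h']
    · simp only [alC, Bool.not_eq_true] at h
      have hd : List.dropWhile nalC (c :: cs) = List.dropWhile nalC cs := by
        simp [nalC, h]
      rw [hd]; exact ih

lemma dropWhile_nal_idem (L : List Char) :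
    (L.dropWhile nalC).dropWhile nalC = L.dropWhile nalC := by
  rcases dropWhile_nal_shape L with h | ⟨e, es, he, hal⟩
  · simp [h]
  · have h' : PySem.Chars.isalnum e = true := hal
    rw [he]; simp [nalC, h']

lemma dropWhile_dash_of_all_al {xs : List Char} (h : ∀ x ∈ xs, alC x = true) :
    xs.dropWhile dashP = xs := by
  cases xs with
  | nil => rfl
  | cons y ys => simp [dashP_of_al (h y (by simp))]

lemma tokensB_dropWhile (L : List Char) : tokensB (L.dropWhile nalC) = tokensB L := by
  induction L with
  | nil => rfl
  | cons c cs ih =>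
    by_cases h : alC c = true
    · have h' : PySem.Chars.isalnum c = true := h
      have hd : List.dropWhile nalC (c :: cs) = c :: cs := by
        simp [nalC, h']
      rw [hd]
    · simp only [alC, Bool.not_eq_true] at h
      have hd : List.dropWhile nalC (c :: cs) = List.dropWhile nalC cs := by
        simp [nalC, h]
      rw [hd, ih]
      conv_rhs => rw [tokensB]
      simp [h]

lemma tokensB_cons_al {c : Char} (cs : List Char) (h : alC c = true) :
    tokensB (c :: cs) = (c :: cs.takeWhile PySem.Chars.isalnum) :: tokensB (cs.dropWhile PySem.Chars.isalnum) := by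
  have h' : PySem.Chars.isalnum c = true := h
  rw [tokensB]; simp [h']

lemma head_dropWhile_false {p : Char → Bool} {l : List Char} {d : Char} {ds : List Char}
    (h : l.dropWhile p = d :: ds) : p d = false := by
  induction l with
  | nil => simp [List.dropWhile] at h
  | cons c cs ih =>
    rw [List.dropWhile_cons] at h
    by_cases hc : p c = true
    · rw [if_pos hc] at h; exact ih h
    · have hc' : p c = false := by simpa using hc
      rw [hc'] at h
      simp only [Bool.false_eq_true, if_false, List.cons.injEq] at h
      exact h.1 ▸ hc'

lemma rstripD_all_al {xs : List Char} (h : ∀ x ∈ xs, alC x = true) : rstripD xs = xs := by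
  unfold rstripD
  rw [dropWhile_dash_of_all_al (fun x hx => h x (List.mem_reverse.mp hx)), List.reverse_reverse]

lemma rstripD_append_dash {xs : List Char} (h : ∀ x ∈ xs, alC x = true) :
    rstripD (xs ++ ['-']) = xs := by
  unfold rstripD
  rw [List.reverse_append]
  simp only [List.reverse_cons, List.reverse_nil, List.nil_append, List.singleton_append,
    List.dropWhile_cons, dashP_dash, if_true]
  rw [dropWhile_dash_of_all_al (fun x hx => h x (List.mem_reverse.mp hx)), List.reverse_reverse]

lemma rstripD_append (X Y : List Char) (hne : Y.reverse.dropWhile dashP ≠ []) :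
    rstripD (X ++ Y) = X ++ rstripD Y := by
  unfold rstripD
  rw [List.reverse_append, List.dropWhile_append]
  have hie : (Y.reverse.dropWhile dashP).isEmpty = false := by
    rwa [List.isEmpty_eq_false_iff]
  rw [hie]
  simp only [Bool.false_eq_true, if_false]
  rw [List.reverse_append, List.reverse_reverse]

-- main right-strip lemma, on inputs starting with an alnum char (or empty)
lemma rstrip_gA : ∀ (n : Nat) (M : List Char), M.length ≤ n → M.dropWhile nalC = M →
    rstripD (gA M) = PySem.Chars.join ['-'] (tokensB M) := by
  intro n
  induction n with
  | zero =>
    intro M hlen _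
    have : M = [] := List.eq_nil_of_length_eq_zero (Nat.le_zero.mp hlen)
    subst this
    simp [gA, loopA, rstripD, tokensB, PySem.Chars.join_nil]
  | succ n ih =>
    intro M hlen hM
    cases M with
    | nil => simp [gA, loopA, rstripD, tokensB, PySem.Chars.join_nil]
    | cons c cs =>
      have hc : alC c = true := by
        by_contra hcc
        have h' : PySem.Chars.isalnum c = false := by simpa [alC] using hcc
        rw [List.dropWhile_cons] at hM
        simp only [nalC, h', Bool.not_false, if_true] at hM
        have hle := List.length_dropWhile_le nalC cs
        rw [hM] at hle; simp at hle
      set t := cs.takeWhile alC with ht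
      set r := cs.dropWhile alC with hr
      have hts : t ++ r = cs := List.takeWhile_append_dropWhile
      have htal : ∀ x ∈ t, alC x = true := fun x hx => List.mem_takeWhile_imp hx
      have hgA : gA (c :: cs) = (c :: t) ++ gA r := by
        rw [gA_cons_al cs hc]
        conv_lhs => rw [← hts]
        rw [gA_run t r htal]
        rfl
      have htok : tokensB (c :: cs) = (c :: t) :: tokensB r := tokensB_cons_al cs hc
      have hct : ∀ x ∈ c :: t, alC x = true := by
        intro x hx; rcases List.mem_cons.mp hx with h | h
        · subst h; exact hc
        · exact htal x h
      cases hrshape : r with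
      | nil =>
        rw [hgA, htok, hrshape]
        have hgnil : gA [] = [] := rfl
        rw [hgnil, List.append_nil]
        have htnil : tokensB [] = [] := by rw [tokensB]
        rw [htnil, PySem.Chars.join_singleton, rstripD_all_al hct]
      | cons d ds =>
        have hdd : cs.dropWhile alC = d :: ds := by rw [← hr]; exact hrshape
        have hd : alC d = false := head_dropWhile_false hdd
        set r' := ds.dropWhile nalC with hr'
        have hgr : gA r = '-' :: gA r' := by rw [hrshape]; exact gA_cons_nal ds hd
        have htokr : tokensB r = tokensB r' := by
          rw [hrshape]
          conv_lhs => rw [tokensB]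
          have hd' : PySem.Chars.isalnum d = false := hd
          simp only [hd', Bool.false_eq_true, if_false]
          exact (tokensB_dropWhile ds).symm
        have hlen' : r'.length ≤ n := by
          have h1 := List.length_dropWhile_le nalC ds
          have h2 := List.length_dropWhile_le alC cs
          rw [← hr, hrshape] at h2
          simp only [List.length_cons] at h2 hlen
          rw [hr']
          omega
        have hIH := ih r' hlen' (dropWhile_nal_idem ds)
        rcases dropWhile_nal_shape ds with hnil | ⟨e, es, hee, hale⟩
        · -- r' = []: the token run is last; a single trailing dash is stripped
          rw [← hr'] at hnil
          rw [hgA, hgr, hnil, htok, htokr, hnil]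
          have hgnil : gA [] = [] := rfl
          have htnil : tokensB [] = [] := by rw [tokensB]
          rw [hgnil, htnil, PySem.Chars.join_singleton, rstripD_append_dash hct]
        · -- r' starts with an alnum char: recurse on it
          rw [← hr'] at hee
          have hgr' : gA r' = e :: gA es := by rw [hee]; exact gA_cons_al es hale
          have htokr' : tokensB r' = (e :: es.takeWhile PySem.Chars.isalnum) :: tokensB (es.dropWhile PySem.Chars.isalnum) := by
            rw [hee]; exact tokensB_cons_al es hale
          have hne : (gA r').reverse.dropWhile dashP ≠ [] := by
            intro hcontra
            rw [List.dropWhile_eq_nil_iff] at hcontra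
            have he : e ∈ (gA r').reverse := by rw [hgr']; simp
            have := hcontra e he
            rw [dashP_of_al hale] at this
            exact absurd this (by simp)
          have hne2 : (('-' :: gA r').reverse).dropWhile dashP ≠ [] := by
            intro hcontra
            rw [List.dropWhile_eq_nil_iff] at hcontra
            have he : e ∈ ('-' :: gA r').reverse := by rw [hgr']; simp
            have := hcontra e he
            rw [dashP_of_al hale] at this
            exact absurd this (by simp)
          rw [hgA, hgr, htok, htokr]
          rw [rstripD_append (c :: t) ('-' :: gA r') hne2]
          rw [show ('-' :: gA r') = ['-'] ++ gA r' from rfl]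
          rw [rstripD_append ['-'] (gA r') hne]
          rw [hIH, htokr', PySem.Chars.join_cons_cons, ← htokr']
          simp

-- final list-level equality, for every list of characters
lemma strip_gA_eq_join (L : List Char) :
    PySem.Chars.stripChars (gA L) ['-'] = PySem.Chars.join ['-'] (tokensB L) := by
  have hstage1 : (gA L).dropWhile dashP = gA (L.dropWhile nalC) := by
    cases L with
    | nil => rfl
    | cons c cs =>
      by_cases h : alC c = true
      · have h' : PySem.Chars.isalnum c = true := h
        have hd : List.dropWhile nalC (c :: cs) = c :: cs := by
          simp [nalC, h']
        rw [hd, gA_cons_al cs h]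
        simp [dashP_of_al h]
      · have hfalse : alC c = false := by simpa using h
        have h' : PySem.Chars.isalnum c = false := hfalse
        have hd : List.dropWhile nalC (c :: cs) = List.dropWhile nalC cs := by
          simp [nalC, h']
        rw [hd, gA_cons_nal cs hfalse, List.dropWhile_cons]
        simp only [dashP_dash, if_true]
        rcases dropWhile_nal_shape cs with hnil | ⟨e, es, hee, hale⟩
        · rw [hnil]; rfl
        · rw [hee, gA_cons_al es hale]
          simp [dashP_of_al hale]
  have hstrip : PySem.Chars.stripChars (gA L) ['-'] = rstripD ((gA L).dropWhile dashP) := rfl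
  rw [hstrip, hstage1, rstrip_gA (L.dropWhile nalC).length _ le_rfl (dropWhile_nal_idem L),
    tokensB_dropWhile]

-- ===== VERDICT (by name: the statement is the Claim_ definition above) =====
theorem sanitise_label_py_spec : Claim_equal_sanitise_label_py := by
  intro label _
  unfold Spec_sanitise_label_py sanitise_label_py sanitise_label_py_alt
  exact congrArg String.ofList (strip_gA_eq_join (PySem.Chars.lower label.toList))
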